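-- pv_equiv track=rewrite | github.com/juanjoseexpositogonzalez/aoc25 | day02/main.py | process_ids
-- ===== SOURCE A (Python) =====
-- from typing import Dict, List, Final, Tuple
--
-- def is_id_invalid(id: int) -> bool:
--     """
--     Check if the id is invalid.
--
--     Args:
--         id: The id to check if it is invalid.
--
--     Returns:
--         True if the id is invalid, False otherwise.
--     """
--     # 1. Convert the id to a string
--     id_str = str(id)
--     # 2. Calculate the length of the id
--     length = len(id_str)
--     if id_str[:length // 2] == id_str[length // 2:]:
--         return True
--     return False
--
-- def process_ids(input: List[Tuple[int, int]]) -> Dict[str, List[int]]: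
--     """
--     Process the id.
--
--     Args:
--         input: The input to process.
--
--     Returns:
--         A dictionary with the key as the range and the value as the invalid ids.
--     """
--     results: Dict[str, List[int]] = {}
--
--     for start, end in input:
--         for candidate in range(start, end + 1):
--             key = f"{start}-{end}"
--             if is_id_invalid(candidate):
--                 if key not in results:
--                     results[key] = []
--                 results[key].append(candidate)
--     return results
-- ===== SOURCE B (Python) =====
-- from typing import Dict, List, Tuple
--
--
-- def process_ids(input: List[Tuple[int, int]]) -> Dict[str, List[int]]:
--     """Enumerate the invalid ids of each range directly: an id is invalid exactly
--     when its decimal string is two identical halves, i.e. it equals h * (10**L + 1)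
--     for some L >= 1 and some L-digit half h; so per range we walk the half values
--     instead of every candidate."""
--     results: Dict[str, List[int]] = {}
--     for start, end in input:
--         lo = max(start, 1)
--         if end >= lo:
--             invalids: List[int] = []
--             for L in range(1, len(str(end)) // 2 + 1):
--                 base = 10 ** L + 1
--                 a = max(10 ** (L - 1), -(-lo // base))
--                 b = min(10 ** L - 1, end // base)
--                 for h in range(a, b + 1):
--                     invalids.append(h * base)
--             if invalids:
--                 key = f"{start}-{end}"
--                 if key not in results:
--                     results[key] = []
--                 results[key].extend(invalids)
--     return results
-- ===== Notes on version B (the rewrite author's own statement) =====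
-- stated objective: faster
-- what changed: Instead of testing every candidate in each range for the equal-halves string property, B enumerates the invalid ids directly as h*(10^L+1) over each even digit-length L, walking only the half-values h that land inside the range.
import Mathlib
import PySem

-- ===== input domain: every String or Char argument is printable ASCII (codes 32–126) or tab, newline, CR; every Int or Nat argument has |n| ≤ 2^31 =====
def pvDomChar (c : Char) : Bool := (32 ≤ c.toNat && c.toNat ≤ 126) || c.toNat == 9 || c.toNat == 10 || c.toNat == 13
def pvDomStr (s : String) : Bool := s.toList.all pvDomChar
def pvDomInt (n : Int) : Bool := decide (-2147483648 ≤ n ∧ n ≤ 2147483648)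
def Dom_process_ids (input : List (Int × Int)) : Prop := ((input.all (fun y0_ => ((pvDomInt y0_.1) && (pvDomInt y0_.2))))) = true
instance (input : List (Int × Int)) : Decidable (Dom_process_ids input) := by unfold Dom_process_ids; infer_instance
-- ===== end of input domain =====

-- B enumerates the invalid ids of a range directly (h * (10^L + 1) per even length) instead of
-- testing every candidate in the range; objective: faster (asymptotic).

-- ===== PORT A =====
def is_id_invalid (id : Int) : Bool :=
  let id_str := PySem.Int.toStr id
  let length := PySem.Str.len id_str
  if PySem.Str.slice id_str none (some (PySem.Int.floordiv length 2)) =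
     PySem.Str.slice id_str (some (PySem.Int.floordiv length 2)) none then
    true
  else
    false

def process_ids (input : List (Int × Int)) : List (String × List Int) :=
  (input.foldl (fun results se =>
      (PySem.List.pyRange se.1 (se.2 + 1) 1).foldl (fun results candidate =>
          let key := PySem.Int.toStr se.1 ++ "-" ++ PySem.Int.toStr se.2
          if is_id_invalid candidate then
            let results := if results.contains key then results else results.insert key []
            results.modify key [] (fun l => l ++ [candidate])
          else results)
        results)
    (PySem.Dict.empty : PySem.Dict String (List Int))).items

-- ===== PORT B =====
-- (10 ** e with e ≥ 0 is ported as 10 ^ e.toNat; both exponents here come from range(1, …), so e ≥ 0)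
def process_ids_alt (input : List (Int × Int)) : List (String × List Int) :=
  (input.foldl (fun results se =>
      let lo := max se.1 1
      if lo ≤ se.2 then
        let invalids :=
          (PySem.List.pyRange 1 (PySem.Int.floordiv (PySem.Str.len (PySem.Int.toStr se.2)) 2 + 1) 1).foldl
            (fun acc L =>
              let base : Int := 10 ^ L.toNat + 1
              let a := max (10 ^ (L - 1).toNat) (-(PySem.Int.floordiv (-lo) base))
              let b := min (10 ^ L.toNat - 1) (PySem.Int.floordiv se.2 base)
              (PySem.List.pyRange a (b + 1) 1).foldl (fun acc h => acc ++ [h * base]) acc)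
            ([] : List Int)
        if invalids ≠ [] then
          let key := PySem.Int.toStr se.1 ++ "-" ++ PySem.Int.toStr se.2
          let results := if results.contains key then results else results.insert key []
          results.modify key [] (fun l => l ++ invalids)
        else results
      else results)
    (PySem.Dict.empty : PySem.Dict String (List Int))).items

-- ===== PRECONDITION & SPEC =====
def Spec_process_ids (input : List (Int × Int)) (out : List (String × List Int)) : Prop := out = process_ids_alt input
instance (input : List (Int × Int)) (out : List (String × List Int)) : Decidable (Spec_process_ids input out) := by unfold Spec_process_ids; infer_instance

-- ===== CLAIM (what is proved, stated in full; the proofs are below) =====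
def Claim_equal_process_ids : Prop := ∀ (input : List (Int × Int)), Dom_process_ids input → Spec_process_ids input (process_ids input)

-- ===== LEMMAS AND PROOFS =====

theorem toDigitsCore_ten_eq (f : Nat) : ∀ (n : Nat) (ds : List Char), 0 < n → n < 10 ^ f →
    Nat.toDigitsCore 10 f n ds = ((Nat.digits 10 n).map Nat.digitChar).reverse ++ ds := by
  induction f with
  | zero => intro n ds h1 h2; simp at h2; omega
  | succ f ih =>
    intro n ds h1 h2
    rw [Nat.toDigitsCore]
    rw [Nat.digits_def' (by norm_num : (1:Nat) < 10) h1]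
    by_cases hz : n / 10 = 0
    · simp [hz]
    · simp only [hz, if_false]
      rw [ih (n / 10) _ (Nat.pos_of_ne_zero hz) (Nat.div_lt_of_lt_mul (by rw [pow_succ] at h2; omega))]
      simp

theorem toDigits_ten_eq (n : Nat) (h : 0 < n) :
    Nat.toDigits 10 n = ((Nat.digits 10 n).map Nat.digitChar).reverse := by
  rw [Nat.toDigits, toDigitsCore_ten_eq (n+1) n [] h ((Nat.lt_pow_self (by norm_num)).trans (Nat.pow_lt_pow_succ (by norm_num)))]
  simp

theorem toChars_pos (n : Int) (h : 0 < n) :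
    PySem.Int.toChars n = ((Nat.digits 10 n.toNat).map Nat.digitChar).reverse := by
  rw [PySem.Int.toChars]
  rw [if_neg (by omega)]
  exact toDigits_ten_eq n.toNat (by omega)

theorem inv_chars (c : Int) :
    is_id_invalid c = true ↔
      (PySem.Int.toChars c).take ((PySem.Int.toChars c).length / 2)
        = (PySem.Int.toChars c).drop ((PySem.Int.toChars c).length / 2) := by
  unfold is_id_invalid
  dsimp only
  have hlen : PySem.Str.len (PySem.Int.toStr c) = ((PySem.Int.toChars c).length : Int) := by
    simp [pysem]
  have hfd : PySem.Int.floordiv ((PySem.Int.toChars c).length : Int) 2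
      = (((PySem.Int.toChars c).length / 2 : Nat) : Int) := by
    exact_mod_cast PySem.Int.floordiv_natCast _ 2
  rw [hlen, hfd]
  have hiff : ∀ (x y : String), ((if x = y then true else false) = true) ↔ x = y := by
    intro x y; split_ifs with h <;> simp [h]
  rw [hiff, ← String.toList_inj]
  simp only [pysem, PySem.Str.toList_slice, PySem.Int.toList_toStr]

def InvalidArith (c : Int) : Prop :=
  ∃ k : Nat, 1 ≤ k ∧ ∃ h : Int, 10 ^ (k - 1) ≤ h ∧ h < 10 ^ k ∧ c = h * ((10 : Int) ^ k + 1)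

theorem digitChar_ne_dash (d : Nat) (h : d < 10) : Nat.digitChar d ≠ '-' := by
  interval_cases d <;> decide

theorem digitChar_inj (d1 d2 : Nat) (h1 : d1 < 10) (h2 : d2 < 10)
    (h : Nat.digitChar d1 = Nat.digitChar d2) : d1 = d2 := by
  interval_cases d1 <;> interval_cases d2 <;> revert h <;> decide

theorem map_digitChar_inj (l1 l2 : List Nat) (h1 : ∀ d ∈ l1, d < 10) (h2 : ∀ d ∈ l2, d < 10)
    (h : l1.map Nat.digitChar = l2.map Nat.digitChar) : l1 = l2 := by
  induction l1 generalizing l2 with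
  | nil => cases l2 <;> simp_all
  | cons a l ih =>
    cases l2 with
    | nil => simp_all
    | cons b l' =>
      simp only [List.map_cons, List.cons.injEq] at h
      have := digitChar_inj a b (h1 a (by simp)) (h2 b (by simp)) h.1
      rw [this, ih l' (fun d hd => h1 d (by simp [hd])) (fun d hd => h2 d (by simp [hd])) h.2]

theorem invalid_neg (c : Int) (hc : c < 0) : ¬ is_id_invalid c = true := by
  rw [inv_chars]
  have hpos : 0 < c.natAbs := by omega
  have hsd : PySem.Int.toChars c = '-' :: ((Nat.digits 10 c.natAbs).map Nat.digitChar).reverse := by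
    rw [PySem.Int.toChars, if_pos hc, toDigits_ten_eq _ hpos]
  rw [hsd]
  intro hC
  have hmemt : '-' ∉ ((Nat.digits 10 c.natAbs).map Nat.digitChar).reverse := by
    simp only [List.mem_reverse, List.mem_map]
    rintro ⟨d, hd, hdc⟩
    exact digitChar_ne_dash d (Nat.digits_lt_base (by norm_num) hd) hdc
  have hne : ((Nat.digits 10 c.natAbs).map Nat.digitChar).reverse ≠ [] := by
    simp [Nat.digits_ne_nil_iff_ne_zero, hpos.ne']
  have hlen : 1 ≤ (((Nat.digits 10 c.natAbs).map Nat.digitChar).reverse).length :=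
    List.length_pos_iff.2 hne
  rw [show ('-' :: ((Nat.digits 10 c.natAbs).map Nat.digitChar).reverse).length / 2
      = (('-' :: ((Nat.digits 10 c.natAbs).map Nat.digitChar).reverse).length / 2 - 1) + 1 from by
        simp only [List.length_cons]; omega] at hC
  rw [List.take_succ_cons, List.drop_succ_cons] at hC
  exact hmemt (List.mem_of_mem_drop (hC ▸ List.mem_cons_self))

theorem invalid_pos (m : Nat) (hm : 0 < m) :
    (is_id_invalid (m : Int) = true) ↔ InvalidArith (m : Int) := by
  rw [inv_chars]
  have htc : PySem.Int.toChars (m : Int) = ((Nat.digits 10 m).map Nat.digitChar).reverse := by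
    rw [toChars_pos _ (by exact_mod_cast hm)]; simp
  rw [htc]
  have hlenr : (((Nat.digits 10 m).map Nat.digitChar).reverse).length = (Nat.digits 10 m).length := by
    simp
  constructor
  · intro hC
    have hlen := congrArg List.length hC
    simp only [List.length_take, List.length_drop, hlenr] at hlen
    set ds := Nat.digits 10 m with hds
    set l := ds.length with hl
    have hkl : l / 2 ≤ l := by omega
    have hl2 : l = 2 * (l / 2) := by omega
    set k := l / 2 with hk
    rw [hlenr] at hC
    rw [List.take_reverse, List.drop_reverse] at hC
    have hC2 : (List.map Nat.digitChar ds).drop ((List.map Nat.digitChar ds).length - k)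
        = (List.map Nat.digitChar ds).take ((List.map Nat.digitChar ds).length - k) :=
      List.reverse_injective hC
    rw [List.length_map, ← hl, show l - k = k from by omega] at hC2
    rw [← List.map_drop, ← List.map_take] at hC2
    have hdt : ds.drop k = ds.take k :=
      map_digitChar_inj _ _
        (fun d hd => Nat.digits_lt_base (by norm_num) (List.mem_of_mem_drop hd))
        (fun d hd => Nat.digits_lt_base (by norm_num) (List.mem_of_mem_take hd)) hC2
    have hk1 : 1 ≤ k := by
      rcases Nat.eq_zero_or_pos k with h0 | h1
      · exfalso
        have : ds = [] := List.length_eq_zero_iff.1 (by omega)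
        exact (Nat.digits_ne_nil_iff_ne_zero.2 hm.ne') this
      · exact h1
    set e := ds.take k with he
    have hsplit : ds = e ++ e := by
      conv_lhs => rw [← List.take_append_drop k ds]
      rw [hdt]
    have hlene : e.length = k := by rw [he, List.length_take]; omega
    have hener : e ≠ [] := by
      intro h0; rw [h0] at hlene; simp at hlene; omega
    have hval : m = Nat.ofDigits 10 e + 10 ^ k * Nat.ofDigits 10 e := by
      conv_lhs => rw [← Nat.ofDigits_digits 10 m, ← hds, hsplit]
      rw [Nat.ofDigits_append, hlene]
    have hlt : Nat.ofDigits 10 e < 10 ^ k := by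
      rw [← hlene]
      exact Nat.ofDigits_lt_base_pow_length'
        (fun d hd => Nat.digits_lt_base (by norm_num) (List.mem_of_mem_take hd))
    have hlast : e.getLast hener ≠ 0 := by
      have h1 : ds ≠ [] := Nat.digits_ne_nil_iff_ne_zero.2 hm.ne'
      have h2 := Nat.getLast_digit_ne_zero 10 (m := m) hm.ne'
      have h3 : ds.getLast? = e.getLast? := by
        rw [hsplit, List.getLast?_append_of_ne_nil _ hener]
      rw [List.getLast?_eq_some_getLast h1, List.getLast?_eq_some_getLast hener] at h3
      intro h0
      apply h2
      rw [Option.some_inj.1 h3, h0]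
    have hge : 10 ^ (k - 1) ≤ Nat.ofDigits 10 e := by
      conv_lhs => rw [show (10:Nat) ^ (k-1) = 10 ^ (k-1) * 1 from by ring]
      conv_rhs => rw [← List.dropLast_append_getLast hener]
      rw [Nat.ofDigits_append]
      have hld : e.dropLast.length = k - 1 := by rw [List.length_dropLast, hlene]
      rw [hld]
      have : 1 ≤ e.getLast hener := Nat.one_le_iff_ne_zero.2 hlast
      calc 10 ^ (k-1) * 1 ≤ 10 ^ (k-1) * (Nat.ofDigits 10 [e.getLast hener]) := by
            simp [Nat.ofDigits]; omega
        _ ≤ Nat.ofDigits 10 e.dropLast + 10 ^ (k-1) * Nat.ofDigits 10 [e.getLast hener] := by omega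
    refine ⟨k, hk1, (Nat.ofDigits 10 e : Int), ?_, ?_, ?_⟩
    · exact_mod_cast hge
    · exact_mod_cast hlt
    · rw [hval]; push_cast; ring
  · rintro ⟨k, hk1, h, hb1, hb2, hc⟩
    have hh0 : 0 < h := lt_of_lt_of_le (by positivity) hb1
    set hn := h.toNat with hhn
    have hhnc : (hn : Int) = h := Int.toNat_of_nonneg hh0.le
    have hbn1 : 10 ^ (k-1) ≤ hn := by
      have := hb1; rw [← hhnc] at this; exact_mod_cast this
    have hbn2 : hn < 10 ^ k := by
      have := hb2; rw [← hhnc] at this; exact_mod_cast this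
    have hmn : m = hn * (10 ^ k + 1) := by
      have : (m : Int) = ((hn * (10 ^ k + 1) : Nat) : Int) := by
        push_cast; rw [hhnc]; exact hc
      exact_mod_cast this
    have hn0 : hn ≠ 0 := by
      have h1 : (0:Nat) < 10 ^ (k - 1) := pow_pos (by norm_num) _
      omega
    set e := Nat.digits 10 hn with he
    have hlog : Nat.log 10 hn = k - 1 :=
      Nat.log_eq_of_pow_le_of_lt_pow hbn1 (by rw [show k - 1 + 1 = k from by omega]; exact hbn2)
    have hlene : e.length = k := by
      rw [he, Nat.length_digits 10 hn (by norm_num) hn0, hlog]; omega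
    have hener : e ≠ [] := Nat.digits_ne_nil_iff_ne_zero.2 hn0
    have hds : Nat.digits 10 m = e ++ e := by
      have hval : m = Nat.ofDigits 10 (e ++ e) := by
        rw [Nat.ofDigits_append, hlene, he, Nat.ofDigits_digits, hmn]; ring
      rw [hval]
      exact Nat.digits_ofDigits 10 (by norm_num) _
        (fun d hd => by
          rcases List.mem_append.1 hd with h | h <;>
            exact Nat.digits_lt_base (by norm_num) (he ▸ h))
        (fun hne => by
          rw [List.getLast_append_of_ne_nil _ hener]
          exact Nat.getLast_digit_ne_zero 10 hn0)
    rw [hds]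
    have hmap : List.map Nat.digitChar (e ++ e)
        = List.map Nat.digitChar e ++ List.map Nat.digitChar e := by simp
    rw [hmap]
    have hlenm : (List.map Nat.digitChar e).length = k := by simp [hlene]
    have hlen2 : (List.map Nat.digitChar e ++ List.map Nat.digitChar e).length = 2 * k := by
      simp [hlenm]; omega
    rw [List.length_reverse, hlen2, show 2 * k / 2 = k from by omega]
    rw [List.take_reverse, List.drop_reverse, hlen2, show 2 * k - k = k from by omega]
    rw [List.take_left' hlenm, List.drop_left' hlenm]

theorem is_id_invalid_iff (c : Int) : is_id_invalid c = true ↔ InvalidArith c := by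
  rcases lt_trichotomy c 0 with h | h | h
  · constructor
    · intro hI; exact absurd hI (invalid_neg c h)
    · rintro ⟨k, hk1, hh, hb1, hb2, hc⟩
      exfalso
      have h1 : (0:Int) < 10 ^ (k-1) := by positivity
      nlinarith [pow_pos (show (0:Int) < 10 from by norm_num) k]
  · subst h
    constructor
    · intro hI; exact absurd hI (by decide)
    · rintro ⟨k, hk1, hh, hb1, hb2, hc⟩
      have h10 : (0:Int) < 10 ^ (k-1) := by positivity
      nlinarith [pow_pos (show (0:Int) < 10 from by norm_num) k]
  · have := invalid_pos c.toNat (by omega)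
    rwa [Int.toNat_of_nonneg h.le] at this

theorem eq_of_pairwise_lt_of_mem_iff :
    ∀ (l1 l2 : List Int), l1.Pairwise (· < ·) → l2.Pairwise (· < ·) →
      (∀ x, x ∈ l1 ↔ x ∈ l2) → l1 = l2 := by
  intro l1
  induction l1 with
  | nil =>
    intro l2 _ _ hm
    cases l2 with
    | nil => rfl
    | cons b t => exact absurd ((hm b).2 (by simp)) (by simp)
  | cons a t ih =>
    intro l2 h1 h2 hm
    cases l2 with
    | nil => exact absurd ((hm a).1 (by simp)) (by simp)
    | cons b t2 =>
      have hab : a = b := by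
        have ha := (hm a).1 (by simp)
        have hb := (hm b).2 (by simp)
        rcases List.mem_cons.1 ha with h | h
        · exact h
        · rcases List.mem_cons.1 hb with h' | h'
          · exact h'.symm
          · have := (List.pairwise_cons.1 h2).1 a h
            have := (List.pairwise_cons.1 h1).1 b h'
            omega
      subst hab
      have hmt : ∀ x, x ∈ t ↔ x ∈ t2 := by
        intro x
        constructor
        · intro hx
          have hlt := (List.pairwise_cons.1 h1).1 x hx
          rcases List.mem_cons.1 ((hm x).1 (List.mem_cons_of_mem _ hx)) with h | h
          · omega
          · exact h
        · intro hx
          have hlt := (List.pairwise_cons.1 h2).1 x hx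
          rcases List.mem_cons.1 ((hm x).2 (List.mem_cons_of_mem _ hx)) with h | h
          · omega
          · exact h
      rw [ih t2 (List.pairwise_cons.1 h1).2 (List.pairwise_cons.1 h2).2 hmt]

def blockOf (lo e : Int) (L : Int) : List Int :=
  (PySem.List.pyRange
      (max ((10:Int) ^ (L - 1).toNat) (-(PySem.Int.floordiv (-lo) ((10:Int) ^ L.toNat + 1))))
      (min ((10:Int) ^ L.toNat - 1) (PySem.Int.floordiv e ((10:Int) ^ L.toNat + 1)) + 1) 1).map
    (· * ((10:Int) ^ L.toNat + 1))

def KOf (e : Int) : Int := PySem.Int.floordiv (PySem.Str.len (PySem.Int.toStr e)) 2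

theorem invalid_ge_eleven (x : Int) (h : InvalidArith x) : 11 ≤ x := by
  obtain ⟨k, hk1, hh, hb1, hb2, hc⟩ := h
  have h1 : (1:Int) ≤ 10 ^ (k-1) := one_le_pow₀ (by norm_num)
  have h2 : (10:Int) ≤ 10 ^ k := by
    calc (10:Int) = 10 ^ 1 := (pow_one 10).symm
    _ ≤ 10 ^ k := pow_le_pow_right₀ (by norm_num) hk1
  nlinarith

theorem KOf_pos (e : Int) (he : 1 ≤ e) :
    KOf e = (((Nat.log 10 e.toNat + 1) / 2 : Nat) : Int) := by
  have htc : PySem.Int.toChars e = ((Nat.digits 10 e.toNat).map Nat.digitChar).reverse :=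
    toChars_pos e (by omega)
  have hlen : PySem.Str.len (PySem.Int.toStr e) = ((Nat.digits 10 e.toNat).length : Int) := by
    simp [pysem, htc]
  rw [KOf, hlen, Nat.length_digits 10 e.toNat (by norm_num) (by omega)]
  exact_mod_cast PySem.Int.floordiv_natCast _ 2

theorem mem_blockOf (lo e L x : Int) (hL : 1 ≤ L) :
    x ∈ blockOf lo e L ↔
      ∃ h : Int, (10:Int) ^ (L.toNat - 1) ≤ h ∧ h < 10 ^ L.toNat ∧ lo ≤ h * (10 ^ L.toNat + 1) ∧
        h * ((10:Int) ^ L.toNat + 1) ≤ e ∧ x = h * ((10:Int) ^ L.toNat + 1) := by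
  have hbase : (0:Int) < 10 ^ L.toNat + 1 := by positivity
  have hL1 : (L - 1).toNat = L.toNat - 1 := by omega
  constructor
  · intro hx
    simp only [blockOf, List.mem_map, PySem.List.mem_pyRange_one] at hx
    obtain ⟨h, ⟨hlb, hub⟩, hxe⟩ := hx
    have hub' : h ≤ min ((10:Int) ^ L.toNat - 1) (PySem.Int.floordiv e ((10:Int) ^ L.toNat + 1)) := by omega
    have h1 : (10:Int) ^ (L.toNat - 1) ≤ h := le_trans (le_of_eq (by rw [hL1])) (le_trans (le_max_left _ _) hlb)
    have h2 : h < 10 ^ L.toNat := by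
      have := le_trans hub' (min_le_left _ _); omega
    have h3 : lo ≤ h * (10 ^ L.toNat + 1) := by
      have hceil : -(PySem.Int.floordiv (-lo) ((10:Int) ^ L.toNat + 1)) ≤ h :=
        le_trans (le_max_right _ _) hlb
      have : -h ≤ PySem.Int.floordiv (-lo) ((10:Int) ^ L.toNat + 1) := by omega
      have := (PySem.Int.le_floordiv_iff_mul_le hbase).1 this
      nlinarith
    have h4 : h * ((10:Int) ^ L.toNat + 1) ≤ e := by
      have : h ≤ PySem.Int.floordiv e ((10:Int) ^ L.toNat + 1) := le_trans hub' (min_le_right _ _)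
      exact (PySem.Int.le_floordiv_iff_mul_le hbase).1 this
    exact ⟨h, h1, h2, h3, h4, hxe.symm⟩
  · rintro ⟨h, h1, h2, h3, h4, hxe⟩
    simp only [blockOf, List.mem_map, PySem.List.mem_pyRange_one]
    refine ⟨h, ⟨?_, ?_⟩, hxe.symm⟩
    · apply max_le
      · rw [hL1]; exact h1
      · have : -h ≤ PySem.Int.floordiv (-lo) ((10:Int) ^ L.toNat + 1) := by
          rw [PySem.Int.le_floordiv_iff_mul_le hbase]; nlinarith
        omega
    · have h5 : h ≤ PySem.Int.floordiv e ((10:Int) ^ L.toNat + 1) := by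
        rw [PySem.Int.le_floordiv_iff_mul_le hbase]; exact h4
      have h6 : h ≤ (10:Int) ^ L.toNat - 1 := by omega
      omega

theorem blockOf_bounds (lo e L x : Int) (hL : 1 ≤ L) (hx : x ∈ blockOf lo e L) :
    (10:Int) ^ (2 * L.toNat - 1) < x ∧ x < 10 ^ (2 * L.toNat) := by
  obtain ⟨h, h1, h2, h3, h4, hxe⟩ := (mem_blockOf lo e L x hL).1 hx
  have hk1 : 1 ≤ L.toNat := by omega
  have e1 : (10:Int) ^ (2 * L.toNat - 1) = 10 ^ (L.toNat - 1) * 10 ^ L.toNat := by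
    rw [← pow_add]; congr 1; omega
  have e2 : (10:Int) ^ (2 * L.toNat) = 10 ^ L.toNat * 10 ^ L.toNat := by
    rw [← pow_add]; congr 1; omega
  have hp : (0:Int) < 10 ^ (L.toNat - 1) := by positivity
  constructor
  · rw [hxe, e1]; nlinarith
  · rw [hxe, e2]; nlinarith

theorem blockOf_pairwise (lo e L : Int) : (blockOf lo e L).Pairwise (· < ·) := by
  rw [blockOf]
  apply List.Pairwise.map
  · intro a b hab
    have hbase : (0:Int) < 10 ^ L.toNat + 1 := by positivity
    exact mul_lt_mul_of_pos_right hab hbase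
  · exact PySem.List.pairwise_lt_pyRange_one _ _

theorem filterInv_eq (s e : Int) :
    (PySem.List.pyRange s (e+1) 1).filter is_id_invalid
      = if max s 1 ≤ e then (PySem.List.pyRange 1 (KOf e + 1) 1).flatMap (blockOf (max s 1) e)
        else [] := by
  split_ifs with hcase
  · -- main case
    have he1 : 1 ≤ e := le_trans (le_max_right s 1) hcase
    have hs : s ≤ e := le_trans (le_max_left s 1) hcase
    apply eq_of_pairwise_lt_of_mem_iff
    · exact List.Pairwise.filter _ (PySem.List.pairwise_lt_pyRange_one _ _)
    · rw [List.pairwise_flatMap]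
      constructor
      · intro L _; exact blockOf_pairwise _ _ _
      · apply List.Pairwise.imp_of_mem ?_ (PySem.List.pairwise_lt_pyRange_one _ _)
        intro L1 L2 hm1 hm2 hlt x hx y hy
        rw [PySem.List.mem_pyRange_one] at hm1 hm2
        have h1 := (blockOf_bounds _ _ _ _ hm1.1 hx).2
        have h2 := (blockOf_bounds _ _ _ _ hm2.1 hy).1
        have hkk : 2 * L1.toNat ≤ 2 * L2.toNat - 1 := by omega
        have := pow_le_pow_right₀ (show (1:Int) ≤ 10 from by norm_num) hkk
        omega
    · intro x
      rw [List.mem_filter, PySem.List.mem_pyRange_one, List.mem_flatMap]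
      rw [is_id_invalid_iff]
      constructor
      · rintro ⟨⟨hxs, hxe⟩, k, hk1, h, hb1, hb2, hc⟩
        have hx11 : 11 ≤ x := invalid_ge_eleven x ⟨k, hk1, h, hb1, hb2, hc⟩
        refine ⟨(k : Int), ?_, ?_⟩
        · rw [PySem.List.mem_pyRange_one]
          constructor
          · exact_mod_cast hk1
          · -- k ≤ KOf e
            rw [KOf_pos e he1]
            have hlow : (10:Int) ^ (2 * k - 1) ≤ x := by
              have e1 : (10:Int) ^ (2 * k - 1) = 10 ^ (k - 1) * 10 ^ k := by
                rw [← pow_add]; congr 1; omega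
              have hp : (0:Int) < 10 ^ (k-1) := by positivity
              rw [hc, e1]; nlinarith
            have hnat : (10:Nat) ^ (2 * k - 1) ≤ e.toNat := by
              have hle : (10:Int) ^ (2*k-1) ≤ e := le_trans hlow (by omega)
              have he' : e = (e.toNat : Int) := (Int.toNat_of_nonneg (by omega)).symm
              rw [he'] at hle
              exact_mod_cast hle
            have hlog : 2 * k - 1 ≤ Nat.log 10 e.toNat :=
              (Nat.le_log_iff_pow_le (by norm_num) (by omega)).2 hnat
            have : k ≤ (Nat.log 10 e.toNat + 1) / 2 := by omega
            exact_mod_cast (by omega : (k:Int) < ((Nat.log 10 e.toNat + 1) / 2 : Nat) + 1)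
        · rw [mem_blockOf _ _ _ _ (by exact_mod_cast hk1)]
          refine ⟨h, ?_, ?_, ?_, ?_, ?_⟩ <;>
            simp only [Int.toNat_natCast]
          · exact hb1
          · exact hb2
          · rw [← hc]; omega
          · rw [← hc]; omega
          · exact hc
      · rintro ⟨L, hL, hx⟩
        rw [PySem.List.mem_pyRange_one] at hL
        obtain ⟨h, h1, h2, h3, h4, hxe⟩ := (mem_blockOf _ _ _ _ hL.1).1 hx
        refine ⟨⟨?_, by omega⟩, L.toNat, by omega, h, h1, ?_, ?_⟩
        · have := le_trans (le_max_left s 1) h3; omega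
        · exact h2
        · exact hxe
  · -- empty case
    rw [List.eq_nil_iff_forall_not_mem]
    intro x hx
    rw [List.mem_filter, PySem.List.mem_pyRange_one, is_id_invalid_iff] at hx
    obtain ⟨⟨hxs, hxe⟩, hinv⟩ := hx
    have := invalid_ge_eleven x hinv
    simp only [not_le] at hcase
    omega

def ensureKey (d : PySem.Dict String (List Int)) (key : String) : PySem.Dict String (List Int) :=
  if d.contains key then d else d.insert key []

theorem modify_modify_self (d : PySem.Dict String (List Int)) (k : String)
    (f g : List Int → List Int) :
    (d.modify k [] f).modify k [] g = d.modify k [] (fun v => g (f v)) := by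
  simp [PySem.Dict.modify, PySem.Dict.getD_insert_self, PySem.Dict.insert_insert_self]

theorem contains_ensure_modify (d : PySem.Dict String (List Int)) (key : String)
    (f : List Int → List Int) :
    ((ensureKey d key).modify key [] f).contains key = true := by
  rw [PySem.Dict.contains_modify]
  simp

theorem ensure_of_contains (d : PySem.Dict String (List Int)) (key : String)
    (h : d.contains key = true) : ensureKey d key = d := by
  rw [ensureKey, if_pos h]

theorem dict_fold_append (key : String) :
    ∀ (is : List Int) (d : PySem.Dict String (List Int)), is ≠ [] →
      is.foldl (fun d c => (ensureKey d key).modify key [] (fun l => l ++ [c])) d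
        = (ensureKey d key).modify key [] (fun l => l ++ is) := by
  intro is
  induction is with
  | nil => intro d h; exact absurd rfl h
  | cons c is' ih =>
    intro d _
    rw [List.foldl_cons]
    rcases eq_or_ne is' [] with h0 | h0
    · subst h0; simp
    · rw [ih _ h0, ensure_of_contains _ _ (contains_ensure_modify d key _), modify_modify_self]
      congr 1
      funext l
      simp

theorem foldl_ite_filter {β : Type} (p : Int → Bool) (g : β → Int → β) :
    ∀ (l : List Int) (d : β),
      l.foldl (fun acc x => if p x then g acc x else acc) d = (l.filter p).foldl g d := by
  intro l
  induction l with
  | nil => intro d; rfl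
  | cons x l ih =>
    intro d
    rw [List.foldl_cons, List.filter_cons]
    by_cases hp : p x
    · rw [if_pos hp, if_pos hp, List.foldl_cons, ih]
    · rw [if_neg hp, if_neg (by simpa using hp), ih]

theorem invalids_eq (lo e : Int) :
    (PySem.List.pyRange 1 (PySem.Int.floordiv (PySem.Str.len (PySem.Int.toStr e)) 2 + 1) 1).foldl
        (fun acc L =>
          let base : Int := 10 ^ L.toNat + 1
          let a := max (10 ^ (L - 1).toNat) (-(PySem.Int.floordiv (-lo) base))
          let b := min (10 ^ L.toNat - 1) (PySem.Int.floordiv e base)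
          (PySem.List.pyRange a (b + 1) 1).foldl (fun acc h => acc ++ [h * base]) acc)
        ([] : List Int)
      = (PySem.List.pyRange 1 (KOf e + 1) 1).flatMap (blockOf lo e) := by
  rw [show (PySem.Int.floordiv (PySem.Str.len (PySem.Int.toStr e)) 2) = KOf e from rfl]
  have hbody : (fun (acc : List Int) (L : Int) =>
          let base : Int := 10 ^ L.toNat + 1
          let a := max (10 ^ (L - 1).toNat) (-(PySem.Int.floordiv (-lo) base))
          let b := min (10 ^ L.toNat - 1) (PySem.Int.floordiv e base)
          (PySem.List.pyRange a (b + 1) 1).foldl (fun acc h => acc ++ [h * base]) acc)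
      = fun acc L => acc ++ blockOf lo e L := by
    funext acc L
    show (PySem.List.pyRange _ _ 1).foldl (fun acc h => acc ++ [h * (10 ^ L.toNat + 1)]) acc = _
    rw [show (fun (acc : List Int) (h : Int) => acc ++ [h * (10 ^ L.toNat + 1)])
        = fun acc h => acc ++ [(fun x => x * (10 ^ L.toNat + 1)) h] from rfl]
    rw [PySem.List.foldl_append_singleton_eq_map]
    rfl
  rw [hbody, PySem.List.foldl_append_eq_flatMap]
  rfl

theorem per_range (d : PySem.Dict String (List Int)) (se : Int × Int) :
    (PySem.List.pyRange se.1 (se.2 + 1) 1).foldl (fun results candidate =>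
        let key := PySem.Int.toStr se.1 ++ "-" ++ PySem.Int.toStr se.2
        if is_id_invalid candidate then
          let results := if results.contains key then results else results.insert key []
          results.modify key [] (fun l => l ++ [candidate])
        else results) d
    = (let lo := max se.1 1
       if lo ≤ se.2 then
        let invalids :=
          (PySem.List.pyRange 1 (PySem.Int.floordiv (PySem.Str.len (PySem.Int.toStr se.2)) 2 + 1) 1).foldl
            (fun acc L =>
              let base : Int := 10 ^ L.toNat + 1
              let a := max (10 ^ (L - 1).toNat) (-(PySem.Int.floordiv (-lo) base))
              let b := min (10 ^ L.toNat - 1) (PySem.Int.floordiv se.2 base)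
              (PySem.List.pyRange a (b + 1) 1).foldl (fun acc h => acc ++ [h * base]) acc)
            ([] : List Int)
        if invalids ≠ [] then
          let key := PySem.Int.toStr se.1 ++ "-" ++ PySem.Int.toStr se.2
          let results := if d.contains key then d else d.insert key []
          results.modify key [] (fun l => l ++ invalids)
        else d
       else d) := by
  set key := PySem.Int.toStr se.1 ++ "-" ++ PySem.Int.toStr se.2 with hkey
  have hA : (fun (results : PySem.Dict String (List Int)) (candidate : Int) =>
        let key := key
        if is_id_invalid candidate then
          let results := if results.contains key then results else results.insert key []
          results.modify key [] (fun l => l ++ [candidate])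
        else results)
      = fun results candidate =>
          if is_id_invalid candidate then
            (ensureKey results key).modify key [] (fun l => l ++ [candidate])
          else results := rfl
  rw [hA]
  rw [foldl_ite_filter is_id_invalid
        (fun d c => (ensureKey d key).modify key [] (fun l => l ++ [c]))]
  rw [filterInv_eq se.1 se.2]
  dsimp only
  rw [invalids_eq (max se.1 1) se.2]
  by_cases h1 : max se.1 1 ≤ se.2
  · rw [if_pos h1, if_pos h1]
    by_cases h2 : (PySem.List.pyRange 1 (KOf se.2 + 1) 1).flatMap (blockOf (max se.1 1) se.2) = []
    · rw [h2, List.foldl_nil, if_neg (by simp)]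
    · rw [dict_fold_append key _ d h2, if_pos h2]
      rfl
  · rw [if_neg h1, if_neg h1, List.foldl_nil]

theorem ports_agree (input : List (Int × Int)) : process_ids input = process_ids_alt input := by
  unfold process_ids process_ids_alt
  congr 1
  congr 1
  funext results se
  exact per_range results se

-- ===== VERDICT (by name: the statement is the Claim_ definition above) =====
theorem process_ids_spec : Claim_equal_process_ids := by
  intro input _
  unfold Spec_process_ids
  exact ports_agree input
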